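-- pv_equiv track=rewrite | github.com/aisspr/leetcode | code_signal/CS.py | solution
-- ===== SOURCE A (Python) =====
-- def solution(numbers, k):
--     """
--     Find count of subarrays of length k where elements alternate between even and odd
--     """
--     count = 0
--     for i in range(len(numbers) - k + 1):
--         valid = True
--         for j in range(i + 1, i + k):
--             if numbers[j] % 2 == numbers[j-1] % 2:
--                 valid = False
--                 break
--         if valid:
--             count += 1
--     return count
-- ===== SOURCE B (Python) =====
-- def solution(numbers, k):
--     """
--     Find count of subarrays of length k where elements alternate between even and odd
--
--     One pass: run = number of consecutive alternating-parity adjacent pairs ending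
--     at index i; the window of length k ending at i is valid iff run >= k - 1.
--     """
--     count = 0
--     run = 0
--     for i in range(len(numbers)):
--         if i and numbers[i] % 2 != numbers[i - 1] % 2:
--             run += 1
--         else:
--             run = 0
--         if run >= k - 1:
--             count += 1
--     return count
-- ===== Notes on version B (the rewrite author's own statement) =====
-- stated objective: alternative
-- what changed: Replaced the nested start-position/window re-scan with a single pass that maintains the length of the alternating-parity run ending at each index and counts indices whose run is at least k-1.
-- outside the precondition, e.g. on solution([1, 3], 0): A returns 3, B returns 2; on solution([], 0): A returns 1, B returns 0
import Mathlib
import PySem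

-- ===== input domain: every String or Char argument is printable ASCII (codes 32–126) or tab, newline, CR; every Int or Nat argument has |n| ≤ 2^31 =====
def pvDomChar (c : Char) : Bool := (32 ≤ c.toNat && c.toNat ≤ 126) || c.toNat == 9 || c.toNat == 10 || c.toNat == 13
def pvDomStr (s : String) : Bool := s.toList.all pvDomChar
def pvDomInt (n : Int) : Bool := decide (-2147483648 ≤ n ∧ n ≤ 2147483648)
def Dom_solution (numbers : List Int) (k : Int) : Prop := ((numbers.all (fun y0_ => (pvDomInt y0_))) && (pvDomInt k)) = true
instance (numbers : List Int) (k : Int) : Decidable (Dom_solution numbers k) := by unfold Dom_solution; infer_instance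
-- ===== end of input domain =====

-- B replaces A's nested per-start window re-scan by one pass tracking the alternating-parity run length.


-- ===== PORT A =====
-- inner loop 'for j in range(i+1, i+k): … break' → structural recursion over the index list;
-- under Pre_ (1 ≤ k) every index accessed is in range, so pyGetD's default is never read.
def solutionInner (numbers : List Int) : List Int → Bool
  | [] => true
  | j :: rest =>
      if PySem.Int.mod (PySem.List.pyGetD numbers j 0) 2 =
          PySem.Int.mod (PySem.List.pyGetD numbers (j - 1) 0) 2 then
        false
      else
        solutionInner numbers rest

def solution (numbers : List Int) (k : Int) : Int :=
  (PySem.List.pyRange 0 ((numbers.length : Int) - k + 1) 1).foldl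
    (fun count i =>
      if solutionInner numbers (PySem.List.pyRange (i + 1) (i + k) 1) then count + 1
      else count)
    0

-- ===== PORT B =====
-- one pass: state = (count, run); run = number of consecutive alternating-parity
-- adjacent pairs ending at index i; the window of length k ending at i is valid iff run ≥ k-1.
def solution_alt (numbers : List Int) (k : Int) : Int :=
  ((PySem.List.pyRange 0 (numbers.length : Int) 1).foldl
    (fun (s : Int × Int) i =>
      let run : Int :=
        if i ≠ 0 ∧ PySem.Int.mod (PySem.List.pyGetD numbers i 0) 2 ≠
            PySem.Int.mod (PySem.List.pyGetD numbers (i - 1) 0) 2 then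
          s.2 + 1
        else 0
      (if k - 1 ≤ run then s.1 + 1 else s.1, run))
    (0, 0)).1

-- ===== PRECONDITION & SPEC =====
-- Pre_ excludes k ≤ 0, where no subarray of length k exists: A's value len(numbers)-k+1
-- (the number of loop starts, every inner check vacuous) and B's value len(numbers) are
-- both accidents of the respective loop shapes on a meaningless window size.
def Pre_solution (numbers : List Int) (k : Int) : Prop := 1 ≤ k
instance (numbers : List Int) (k : Int) : Decidable (Pre_solution numbers k) := by unfold Pre_solution; infer_instance
def pvWitness_solution : List Int × Int := ([1, 2, 3, 5], 2)

def Spec_solution (numbers : List Int) (k : Int) (out : Int) : Prop := out = solution_alt numbers k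
instance (numbers : List Int) (k : Int) (out : Int) : Decidable (Spec_solution numbers k out) := by unfold Spec_solution; infer_instance

-- ===== CLAIM (what is proved, stated in full; the proofs are below) =====
def Claim_equal_solution : Prop := ∀ (numbers : List Int) (k : Int), Dom_solution numbers k → Pre_solution numbers k → Spec_solution numbers k (solution numbers k)

-- ===== LEMMAS AND PROOFS =====

/-- Nat-indexed form of the parity test numbers[j] % 2 != numbers[j-1] % 2. -/
def altN (numbers : List Int) (j : Nat) : Bool :=
  decide (PySem.Int.mod (numbers.getD j 0) 2 ≠ PySem.Int.mod (numbers.getD (j - 1) 0) 2)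

/-- Nat model of B's run variable: value of `run` after processing index e. -/
def runN (numbers : List Int) : Nat → Nat
  | 0 => 0
  | e + 1 => if altN numbers (e + 1) then runN numbers e + 1 else 0

/-- A's inner loop over range(a, a+m) checks the parity condition at every index. -/
theorem inner_iff_aux (numbers : List Int) :
    ∀ (m : Nat) (a : Int),
      solutionInner numbers (PySem.List.pyRange a (a + (m : Int)) 1) = true ↔
        ∀ j : Int, a ≤ j → j < a + (m : Int) →
          PySem.Int.mod (PySem.List.pyGetD numbers j 0) 2 ≠
            PySem.Int.mod (PySem.List.pyGetD numbers (j - 1) 0) 2 := by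
  intro m
  induction m with
  | zero =>
      intro a
      rw [show a + ((0 : Nat) : Int) = a by push_cast; ring,
        PySem.List.pyRange_one_eq_nil (le_refl a)]
      simp only [solutionInner]
      constructor
      · intro _ j h1 h2; exact absurd h2 (by omega)
      · intro _; trivial
  | succ m ih =>
      intro a
      rw [PySem.List.pyRange_one_cons (by push_cast; omega : a < a + ((m + 1 : Nat) : Int))]
      simp only [solutionInner]
      by_cases h : PySem.Int.mod (PySem.List.pyGetD numbers a 0) 2 =
          PySem.Int.mod (PySem.List.pyGetD numbers (a - 1) 0) 2
      · rw [if_pos h]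
        constructor
        · intro hfalse; exact absurd hfalse (by simp)
        · intro hall
          exact absurd h (hall a (le_refl a) (by push_cast; omega))
      · rw [if_neg h]
        rw [show a + ((m + 1 : Nat) : Int) = (a + 1) + ((m : Nat) : Int) by push_cast; ring]
        rw [ih (a + 1)]
        constructor
        · intro hall j hj1 hj2
          rcases eq_or_lt_of_le hj1 with heq | hlt
          · rw [← heq]; exact h
          · exact hall j (by omega) (by omega)
        · intro hall j hj1 hj2
          exact hall j (by omega) (by omega)

theorem inner_iff (numbers : List Int) (a b : Int) :
    solutionInner numbers (PySem.List.pyRange a b 1) = true ↔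
      ∀ j : Int, a ≤ j → j < b →
        PySem.Int.mod (PySem.List.pyGetD numbers j 0) 2 ≠
          PySem.Int.mod (PySem.List.pyGetD numbers (j - 1) 0) 2 := by
  by_cases hab : a ≤ b
  · rw [show b = a + (((b - a).toNat : Nat) : Int) by omega]
    exact inner_iff_aux numbers (b - a).toNat a
  · rw [PySem.List.pyRange_one_eq_nil (by omega)]
    simp only [solutionInner]
    constructor
    · intro _ j h1 h2; exact absurd h2 (by omega)
    · intro _; trivial

/-- Characterization of the run length: run at e is ≥ m iff the last m adjacent pairs alternate. -/
theorem runN_ge (numbers : List Int) :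
    ∀ (e m : Nat), m ≤ runN numbers e ↔
      m ≤ e ∧ ∀ j : Nat, e - m < j → j ≤ e → altN numbers j = true := by
  intro e
  induction e with
  | zero =>
      intro m
      simp only [runN]
      constructor
      · intro h
        exact ⟨h, fun j h1 h2 => absurd h2 (by omega)⟩
      · intro h; exact h.1
  | succ e ih =>
      intro m
      by_cases h : altN numbers (e + 1) = true
      · simp only [runN, if_pos h]
        cases m with
        | zero =>
            constructor
            · intro _
              exact ⟨Nat.zero_le _, fun j h1 h2 => absurd h2 (by omega)⟩
            · intro _
              exact Nat.zero_le _
        | succ s =>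
            rw [show s + 1 ≤ runN numbers e + 1 ↔ s ≤ runN numbers e by omega, ih s]
            constructor
            · rintro ⟨hse, hall⟩
              refine ⟨by omega, fun j h1 h2 => ?_⟩
              rcases eq_or_lt_of_le h2 with heq | hlt
              · rw [heq]; exact h
              · exact hall j (by omega) (by omega)
            · rintro ⟨hse, hall⟩
              exact ⟨by omega, fun j h1 h2 => hall j (by omega) (by omega)⟩
      · simp only [runN, if_neg h]
        constructor
        · intro hm
          have hm0 : m = 0 := by omega
          subst hm0
          exact ⟨by omega, fun j h1 h2 => absurd h2 (by omega)⟩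
        · rintro ⟨h1, h2⟩
          by_contra hm
          exact h (h2 (e + 1) (by omega) (le_refl _))

/-- Bridge between A's Int-indexed window check starting at t+1 and the Nat-indexed altN. -/
theorem window_iff (numbers : List Int) (K : Nat) (hK : 1 ≤ K) (t : Nat) :
    (∀ j : Int, (t : Int) + 1 ≤ j → j < (t : Int) + (K : Int) →
        PySem.Int.mod (PySem.List.pyGetD numbers j 0) 2 ≠
          PySem.Int.mod (PySem.List.pyGetD numbers (j - 1) 0) 2) ↔
      ∀ jn : Nat, t < jn → jn ≤ t + (K - 1) → altN numbers jn = true := by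
  constructor
  · intro hall jn h1 h2
    have hj := hall (jn : Int) (by omega) (by omega)
    unfold altN
    rw [decide_eq_true_eq]
    rw [PySem.List.pyGetD_natCast numbers jn 0,
      show ((jn : Nat) : Int) - 1 = ((jn - 1 : Nat) : Int) by omega,
      PySem.List.pyGetD_natCast numbers (jn - 1) 0] at hj
    exact hj
  · intro hall j h1 h2
    have halt := hall j.toNat (by omega) (by omega)
    unfold altN at halt
    rw [decide_eq_true_eq] at halt
    rw [show j = ((j.toNat : Nat) : Int) by omega,
      PySem.List.pyGetD_natCast numbers j.toNat 0,
      show ((j.toNat : Nat) : Int) - 1 = ((j.toNat - 1 : Nat) : Int) by omega,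
      PySem.List.pyGetD_natCast numbers (j.toNat - 1) 0]
    exact halt

/-- A's count as a countP over window start positions. -/
theorem solution_eq_countP (numbers : List Int) (k : Int) :
    solution numbers k =
      (((List.range ((numbers.length : Int) - k + 1).toNat).countP
        (fun (t : Nat) => solutionInner numbers
          (PySem.List.pyRange ((t : Int) + 1) ((t : Int) + k) 1)) : Nat) : Int) := by
  unfold solution
  rw [PySem.List.pyRange_one, List.foldl_map]
  simp only [zero_add, sub_zero]
  rw [PySem.List.foldl_count_if
    (fun t : Nat => solutionInner numbers
      (PySem.List.pyRange ((t : Int) + 1) ((t : Int) + k) 1))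
    (List.range ((numbers.length : Int) - k + 1).toNat) 0]
  simp only [zero_add]

/-- B's fold computes (count of indices e < m with run ≥ k-1, run after index m-1). -/
theorem alt_fold (numbers : List Int) (k : Int) :
    ∀ m : Nat,
      (((List.range m).map (fun (t : Nat) => (t : Int))).foldl
        (fun (s : Int × Int) i =>
          (if k - 1 ≤
              (if i ≠ 0 ∧ PySem.Int.mod (PySem.List.pyGetD numbers i 0) 2 ≠
                  PySem.Int.mod (PySem.List.pyGetD numbers (i - 1) 0) 2 then
                s.2 + 1
              else 0) then
            s.1 + 1
          else s.1,
          if i ≠ 0 ∧ PySem.Int.mod (PySem.List.pyGetD numbers i 0) 2 ≠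
              PySem.Int.mod (PySem.List.pyGetD numbers (i - 1) 0) 2 then
            s.2 + 1
          else 0))
        (0, 0)) =
      ((((List.range m).countP (fun e => decide (k - 1 ≤ (runN numbers e : Int))) : Nat) : Int),
        (runN numbers (m - 1) : Int)) := by
  intro m
  induction m with
  | zero => simp [runN]
  | succ m ih =>
      rw [List.range_succ, List.map_append, List.foldl_append, ih]
      simp only [List.map_cons, List.map_nil, List.foldl_cons, List.foldl_nil]
      have hrun : (if (m : Int) ≠ 0 ∧ PySem.Int.mod (PySem.List.pyGetD numbers (m : Int) 0) 2 ≠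
          PySem.Int.mod (PySem.List.pyGetD numbers ((m : Int) - 1) 0) 2 then
            ((runN numbers (m - 1) : Nat) : Int) + 1 else 0) = ((runN numbers m : Nat) : Int) := by
        cases m with
        | zero => simp [runN]
        | succ e =>
            rw [PySem.List.pyGetD_natCast numbers (e + 1) 0,
              show (((e + 1 : Nat) : Int)) - 1 = ((e : Nat) : Int) by push_cast; ring,
              PySem.List.pyGetD_natCast numbers e 0]
            by_cases h : altN numbers (e + 1) = true
            · have hp : PySem.Int.mod (numbers.getD (e + 1) 0) 2 ≠
                  PySem.Int.mod (numbers.getD e 0) 2 := by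
                unfold altN at h
                rw [decide_eq_true_eq] at h
                simpa using h
              rw [if_pos ⟨by push_cast; omega, hp⟩]
              simp only [runN, Nat.add_sub_cancel]
              rw [if_pos h]
              push_cast; ring
            · have hp : PySem.Int.mod (numbers.getD (e + 1) 0) 2 =
                  PySem.Int.mod (numbers.getD e 0) 2 := by
                unfold altN at h
                simpa using h
              rw [if_neg (fun hc => hc.2 hp)]
              simp only [runN]
              rw [if_neg h]
              simp
      have hsing : List.countP (fun e => decide (k - 1 ≤ (runN numbers e : Int))) [m] =
          (if k - 1 ≤ (runN numbers m : Int) then 1 else 0) := by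
        simp [List.countP_cons]
      rw [hrun, List.countP_append, hsing]
      by_cases hle : k - 1 ≤ (runN numbers m : Int)
      · rw [if_pos hle, if_pos hle]
        simp
      · rw [if_neg hle, if_neg hle]
        simp

/-- B's result as a countP over window end positions. -/
theorem alt_eq_countP (numbers : List Int) (k : Int) :
    solution_alt numbers k =
      (((List.range numbers.length).countP
        (fun e => decide (k - 1 ≤ (runN numbers e : Int))) : Nat) : Int) := by
  unfold solution_alt
  rw [PySem.List.pyRange_one]
  simp only [zero_add, sub_zero, Int.toNat_natCast]
  rw [alt_fold numbers k numbers.length]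

/-- Counting indices e < n with d ≤ e and R (e - d) is counting t < n - d with R t. -/
theorem count_shift (n d : Nat) (R : Nat → Bool) :
    (List.range n).countP (fun e => decide (d ≤ e) && R (e - d)) =
      (List.range (n - d)).countP R := by
  by_cases h : d ≤ n
  · have key : List.range n = List.range d ++ (List.range (n - d)).map (fun x => d + x) := by
      rw [← List.range_add]; congr 1; omega
    rw [key, List.countP_append]
    have h1 : (List.range d).countP (fun e => decide (d ≤ e) && R (e - d)) = 0 := by
      apply List.countP_eq_zero.mpr
      intro e he
      rw [List.mem_range] at he
      simp only [Bool.and_eq_true, decide_eq_true_eq]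
      intro hc; omega
    have h2 : ((List.range (n - d)).map (fun x => d + x)).countP
        (fun e => decide (d ≤ e) && R (e - d)) = (List.range (n - d)).countP R := by
      rw [List.countP_map]
      apply List.countP_congr
      intro e he
      simp [Function.comp]
    rw [h1, h2, Nat.zero_add]
  · have h1 : (List.range n).countP (fun e => decide (d ≤ e) && R (e - d)) = 0 := by
      apply List.countP_eq_zero.mpr
      intro e he
      rw [List.mem_range] at he
      simp only [Bool.and_eq_true, decide_eq_true_eq]
      intro hc; omega
    rw [h1, show n - d = 0 by omega]
    rfl

-- ===== VERDICT (by name: the statement is the Claim_ definition above) =====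
theorem solution_spec : Claim_equal_solution := by
  intro numbers k _hdom hpre
  unfold Spec_solution
  have hk : 1 ≤ k := hpre
  set K : Nat := k.toNat with hKdef
  have hKk : (K : Int) = k := by omega
  have hK1 : 1 ≤ K := by omega
  set d : Nat := K - 1 with hddef
  rw [solution_eq_countP, alt_eq_countP]
  have hpred : ∀ e ∈ List.range numbers.length,
      ((fun e => decide (k - 1 ≤ (runN numbers e : Int))) e = true ↔
       (fun e => decide (d ≤ e) &&
         (fun (t : Nat) => solutionInner numbers
           (PySem.List.pyRange ((t : Int) + 1) ((t : Int) + k) 1)) (e - d)) e = true) := by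
    intro e _
    simp only [Bool.and_eq_true, decide_eq_true_eq]
    rw [show (k - 1 ≤ (runN numbers e : Int)) ↔ d ≤ runN numbers e from
      by constructor <;> intro <;> omega]
    rw [runN_ge numbers e d]
    constructor
    · rintro ⟨hde, hall⟩
      refine ⟨hde, ?_⟩
      rw [inner_iff,
        show ((e - d : Nat) : Int) + k = ((e - d : Nat) : Int) + (K : Int) from by omega,
        window_iff numbers K hK1 (e - d)]
      intro jn h1 h2
      exact hall jn (by omega) (by omega)
    · rintro ⟨hde, hinner⟩
      refine ⟨hde, ?_⟩
      rw [inner_iff,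
        show ((e - d : Nat) : Int) + k = ((e - d : Nat) : Int) + (K : Int) from by omega,
        window_iff numbers K hK1 (e - d)] at hinner
      intro j h1 h2
      exact hinner j (by omega) (by omega)
  have h1 : (List.range numbers.length).countP
      (fun e => decide (k - 1 ≤ (runN numbers e : Int))) =
      (List.range numbers.length).countP (fun e => decide (d ≤ e) &&
        (fun (t : Nat) => solutionInner numbers
          (PySem.List.pyRange ((t : Int) + 1) ((t : Int) + k) 1)) (e - d)) :=
    List.countP_congr hpred
  rw [h1, count_shift numbers.length d
    (fun (t : Nat) => solutionInner numbers
      (PySem.List.pyRange ((t : Int) + 1) ((t : Int) + k) 1))]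
  rw [show ((numbers.length : Int) - k + 1).toNat = numbers.length - d by omega]
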